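-- pv_equiv track=rewrite | github.com/Ypz22/Universidad | TercerSemestre/Segundo Parcial/Modelos discretos/P3_D1_NRC14545_Yepez_Jefferson/P3_D1_NRC14545_Yepez_Jefferson_No_5.py | esTrayectoriaSimple
-- ===== SOURCE A (Python) =====
-- def esTrayectoriaSimple(trayectoria):
--     vertices = set()
--     aristas = set()
--     for (u, v) in trayectoria:
--         if u in vertices or v in vertices or (u, v) in aristas or (v, u) in aristas:
--             return False
--         vertices.add(u)
--         vertices.add(v)
--         aristas.add((u, v))
--     return True
-- ===== SOURCE B (Python) =====
-- def esTrayectoriaSimple(trayectoria):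
--     endpoints = []
--     for (u, v) in trayectoria:
--         endpoints.append(u)
--         if u != v:
--             endpoints.append(v)
--     return len(endpoints) == len(set(endpoints))
-- ===== Notes on version B (the rewrite author's own statement) =====
-- stated objective: simpler
-- what changed: B drops the edge set and the early-exit membership checks entirely: it collects all edge endpoints into one flat list (a self-loop contributing one endpoint) and returns a single length comparison against the deduplicated set, which is equivalent because a repeated edge always entails a repeated vertex.
import Mathlib
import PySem

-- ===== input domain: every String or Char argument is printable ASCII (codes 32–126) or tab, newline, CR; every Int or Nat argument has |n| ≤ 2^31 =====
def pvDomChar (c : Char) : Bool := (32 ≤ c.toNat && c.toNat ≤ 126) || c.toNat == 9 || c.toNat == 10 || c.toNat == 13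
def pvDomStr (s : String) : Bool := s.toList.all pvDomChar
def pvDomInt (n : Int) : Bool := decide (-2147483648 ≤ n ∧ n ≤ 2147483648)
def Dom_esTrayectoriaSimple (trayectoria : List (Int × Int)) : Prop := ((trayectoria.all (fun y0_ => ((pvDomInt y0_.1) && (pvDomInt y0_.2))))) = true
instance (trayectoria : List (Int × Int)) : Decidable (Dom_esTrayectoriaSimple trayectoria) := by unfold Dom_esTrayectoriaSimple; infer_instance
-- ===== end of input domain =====

-- B flattens the trajectory into one endpoint list (a self-loop contributes one endpoint) and
-- returns a single length-vs-set-length comparison, dropping A's edge set and early-exit branching (objective: simpler).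

-- ===== PORT A =====
-- the 'for' loop with its early 'return False': structural recursion over the same state (vertices, aristas)
def esTSLoopA : List (Int × Int) → PySem.Set Int → PySem.Set (Int × Int) → Bool
  | [], _, _ => true
  | (u, v) :: rest, vertices, aristas =>
    if vertices.contains u || vertices.contains v || aristas.contains (u, v) || aristas.contains (v, u) then
      false
    else
      esTSLoopA rest (PySem.Set.add (PySem.Set.add vertices u) v) (PySem.Set.add aristas (u, v))

def esTrayectoriaSimple (trayectoria : List (Int × Int)) : Bool :=
  esTSLoopA trayectoria PySem.Set.empty PySem.Set.empty

-- ===== PORT B =====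
def esTrayectoriaSimple_alt (trayectoria : List (Int × Int)) : Bool :=
  let endpoints := trayectoria.foldl
    (fun acc p => (acc ++ [p.1]) ++ (if p.1 ≠ p.2 then [p.2] else [])) []
  PySem.List.len endpoints == PySem.Set.len (PySem.Set.ofList endpoints)

-- ===== PRECONDITION & SPEC =====
def Spec_esTrayectoriaSimple (trayectoria : List (Int × Int)) (out : Bool) : Prop := out = esTrayectoriaSimple_alt trayectoria
instance (trayectoria : List (Int × Int)) (out : Bool) : Decidable (Spec_esTrayectoriaSimple trayectoria out) := by unfold Spec_esTrayectoriaSimple; infer_instance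

-- ===== CLAIM (what is proved, stated in full; the proofs are below) =====
def Claim_equal_esTrayectoriaSimple : Prop := ∀ (trayectoria : List (Int × Int)), Dom_esTrayectoriaSimple trayectoria → Spec_esTrayectoriaSimple trayectoria (esTrayectoriaSimple trayectoria)

-- ===== LEMMAS AND PROOFS =====

-- B's endpoint-collecting step, named for the proofs
def epStep (acc : List Int) (p : Int × Int) : List Int :=
  (acc ++ [p.1]) ++ (if p.1 ≠ p.2 then [p.2] else [])

-- the fold only ever appends to the accumulator
theorem epFold_append (t : List (Int × Int)) (acc : List Int) :
    ∃ rest, t.foldl epStep acc = acc ++ rest := by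
  induction t generalizing acc with
  | nil => exact ⟨[], by simp⟩
  | cons p rest ih =>
    obtain ⟨r, hr⟩ := ih (epStep acc p)
    exact ⟨p.1 :: ((if p.1 ≠ p.2 then [p.2] else []) ++ r), by
      simp only [List.foldl_cons, hr]; simp [epStep]⟩

-- a non-Nodup accumulator stays non-Nodup through the fold
theorem epFold_not_nodup (t : List (Int × Int)) (acc : List Int)
    (h : ¬ acc.Nodup) : ¬ (t.foldl epStep acc).Nodup := by
  obtain ⟨r, hr⟩ := epFold_append t acc
  rw [hr]
  intro hn
  exact h (hn.sublist (List.sublist_append_left acc r))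

-- the loop invariant: A's vertex set has exactly the members of B's endpoint prefix,
-- every stored edge has its first component among the vertices, and the prefix is duplicate-free
theorem loopA_eq_nodup (t : List (Int × Int)) (vs : PySem.Set Int)
    (as : PySem.Set (Int × Int)) (acc : List Int)
    (hmem : ∀ x : Int, x ∈ vs ↔ x ∈ acc)
    (has : ∀ p ∈ as, p.1 ∈ vs)
    (hnd : acc.Nodup) :
    esTSLoopA t vs as = decide (t.foldl epStep acc).Nodup := by
  induction t generalizing vs as acc with
  | nil => simpa [esTSLoopA] using hnd
  | cons p rest ih =>
    obtain ⟨u, v⟩ := p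
    by_cases hc : u ∈ acc ∨ v ∈ acc
    · -- A returns False; B's list repeats a vertex inside the new prefix
      have hcond : (vs.contains u || vs.contains v || as.contains (u, v) || as.contains (v, u)) = true := by
        rcases hc with h | h
        · simp [PySem.Set.contains, (hmem u).mpr h]
        · simp [PySem.Set.contains, (hmem v).mpr h]
      have hbad : ¬ (epStep acc (u, v)).Nodup := by
        simp only [epStep]
        by_cases huv : u = v
        · subst huv
          intro hn
          rw [if_neg (by simp), List.append_nil, List.nodup_append] at hn
          have hu : u ∈ acc := hc.elim id id
          exact hn.2.2 u hu u (List.mem_singleton_self u) rfl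
        · intro hn
          rw [if_pos huv, List.append_assoc, List.nodup_append] at hn
          rcases hc with h | h
          · exact hn.2.2 u h u (by simp) rfl
          · exact hn.2.2 v h v (by simp) rfl
      simp only [List.foldl_cons, esTSLoopA, hcond, if_true]
      symm
      rw [decide_eq_false_iff_not]
      exact epFold_not_nodup rest (epStep acc (u, v)) hbad
    · -- A proceeds; all four membership tests are false (edge hits imply vertex hits)
      rw [not_or] at hc
      have hu : u ∉ vs := fun h => hc.1 ((hmem u).mp h)
      have hv : v ∉ vs := fun h => hc.2 ((hmem v).mp h)
      have he1 : (u, v) ∉ as := fun h => hu (has _ h)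
      have he2 : (v, u) ∉ as := fun h => hv (has _ h)
      have hcond : (vs.contains u || vs.contains v || as.contains (u, v) || as.contains (v, u)) = false := by
        simp [PySem.Set.contains, hu, hv, he1, he2]
      simp only [List.foldl_cons, esTSLoopA, hcond, Bool.false_eq_true, if_false]
      refine ih _ _ (epStep acc (u, v)) ?_ ?_ ?_
      · intro x
        simp only [PySem.Set.mem_add, hmem x, epStep, List.mem_append, List.mem_singleton]
        by_cases huv : u = v
        · subst huv; simp
        · simp [huv]
      · intro q hq
        rcases (PySem.Set.mem_add as (u, v) q).mp hq with h | h
        · exact (PySem.Set.mem_add _ _ _).mpr (Or.inl ((PySem.Set.mem_add _ _ _).mpr (Or.inl (has q h))))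
        · subst h
          exact (PySem.Set.mem_add _ _ _).mpr (Or.inl ((PySem.Set.mem_add _ _ _).mpr (Or.inr rfl)))
      · simp only [epStep]
        by_cases huv : u = v
        · subst huv
          rw [if_neg (by simp), List.append_nil, List.nodup_append]
          refine ⟨hnd, List.nodup_singleton u, ?_⟩
          intro a ha b hb
          rw [List.mem_singleton] at hb
          subst hb
          exact fun hab => hc.1 (hab ▸ ha)
        · rw [if_pos huv, List.append_assoc, List.nodup_append]
          refine ⟨hnd, by simp [huv], ?_⟩
          intro a ha b hb
          simp only [List.cons_append, List.nil_append, List.mem_cons, List.not_mem_nil, or_false] at hb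
          rcases hb with rfl | rfl
          · exact fun hab => hc.1 (hab ▸ ha)
          · exact fun hab => hc.2 (hab ▸ ha)

-- B's length comparison decides Nodup of the endpoint list
theorem setLen_eq_iff_nodup (xs : List Int) :
    (PySem.List.len xs == PySem.Set.len (PySem.Set.ofList xs)) = decide xs.Nodup := by
  have hcard : (PySem.Set.ofList xs).length = xs.toFinset.card := by
    have h1 : (PySem.Set.ofList xs).toFinset = xs.toFinset := by
      ext x; simp [List.mem_toFinset, PySem.Set.mem_ofList]
    calc (PySem.Set.ofList xs).length
        = (PySem.Set.ofList xs).toFinset.card :=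
          (List.toFinset_card_of_nodup (PySem.Set.nodup_ofList xs)).symm
      _ = xs.toFinset.card := by rw [h1]
  by_cases h : xs.Nodup
  · simp [PySem.List.len, PySem.Set.len, h, hcard, List.toFinset_card_of_nodup h]
  · have hlt : xs.toFinset.card ≠ xs.length := by
      intro he
      apply h
      rw [List.card_toFinset] at he
      have := List.Sublist.eq_of_length (xs.dedup_sublist) he
      exact List.dedup_eq_self.mp this
    have h1 : (PySem.List.len xs == PySem.Set.len (PySem.Set.ofList xs)) = false := by
      rw [beq_eq_false_iff_ne]
      simp only [PySem.List.len, PySem.Set.len, hcard, ne_eq, Nat.cast_inj]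
      exact fun he => hlt he.symm
    rw [h1, decide_eq_false h]

-- ===== VERDICT (by name: the statement is the Claim_ definition above) =====
theorem esTrayectoriaSimple_spec : Claim_equal_esTrayectoriaSimple := by
  intro t _
  show esTrayectoriaSimple t = esTrayectoriaSimple_alt t
  have hA := loopA_eq_nodup t PySem.Set.empty PySem.Set.empty []
    (by intro x; simp [PySem.Set.empty]) (by intro p hp; simp [PySem.Set.empty] at hp)
    List.nodup_nil
  rw [esTrayectoriaSimple, hA, esTrayectoriaSimple_alt,
    setLen_eq_iff_nodup]
  rfl
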